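-- pv_equiv track=rewrite | github.com/long-practice/llong | Algorithm/Algo_Problem/Programmers/Programmers_92343.py | solution
-- ===== SOURCE A (Python) =====
-- def solution(info, edges):
--     tree = [0 for _ in range(len(info))]
--     memo = [0 for _ in range(1 << len(info))]
--     for edge in edges:
--         a, b = edge
--         tree[a] |= 1 << b
--
--     def dfs(curr, can_go, s, w):
--         if s - w > 0 and not memo[curr]:
--             memo[curr] = s
--             node = 1
--             while node < len(info):
--                 if can_go & (1 << node):
--                     dfs(curr | (1 << node), (can_go | tree[node]) ^ (1 << node), s + (info[node] ^ 1), w + info[node])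
--                 node += 1
--
--     dfs(1 << 0, tree[0], 1, 0)
--     return max(memo)
-- ===== SOURCE B (Python) =====
-- def solution(info, edges):
--     # Iterative worklist instead of recursion: pop pending states from a stack;
--     # `collected` maps each settled visited-set bitmask to the sheep count
--     # there, and a state is only expanded while it has no count recorded.
--     n = len(info)
--     tree = [0] * n
--     for a, b in edges:
--         tree[a] |= 1 << b
--     collected = {}
--     stack = [(1, tree[0], 1, 0)]
--     while stack:
--         curr, frontier, s, w = stack.pop()
--         if s - w <= 0 or collected.get(curr):
--             continue
--         collected[curr] = s
--         for node in range(n - 1, 0, -1):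
--             if frontier & (1 << node):
--                 stack.append((curr | 1 << node,
--                               (frontier | tree[node]) ^ 1 << node,
--                               s + (info[node] ^ 1),
--                               w + info[node]))
--     return max(collected.values())
-- ===== Notes on version B (the rewrite author's own statement) =====
-- stated objective: alternative
-- what changed: The recursive memoized DFS (closure mutating a 2^n-sized memo array, answer = max(memo)) is replaced by an explicit iterative worklist: a stack of pending states and a dict mapping each settled visited-set bitmask to its sheep count, the answer being the max of the recorded counts.
import Mathlib
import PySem

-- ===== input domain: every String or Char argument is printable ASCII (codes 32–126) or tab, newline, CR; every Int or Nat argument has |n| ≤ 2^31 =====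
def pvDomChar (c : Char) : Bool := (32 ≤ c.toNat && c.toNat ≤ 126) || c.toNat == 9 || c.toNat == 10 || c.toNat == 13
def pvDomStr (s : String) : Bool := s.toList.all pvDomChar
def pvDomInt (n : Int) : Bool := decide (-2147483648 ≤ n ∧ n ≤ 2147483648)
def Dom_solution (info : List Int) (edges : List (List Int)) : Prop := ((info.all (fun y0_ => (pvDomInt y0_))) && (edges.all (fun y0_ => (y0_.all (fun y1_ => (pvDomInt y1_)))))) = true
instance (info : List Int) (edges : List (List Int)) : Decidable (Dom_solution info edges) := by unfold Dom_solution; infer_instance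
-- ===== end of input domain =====

-- B replaces A's recursive memoized DFS by an explicit iterative worklist (stack + a dict
-- of recorded sheep counts, answer = max of the recorded counts); same asymptotic cost.

-- ===== PORT A =====
-- Both Pythons build `tree` with the identical lines `tree[a] |= 1 << b`; shared helper.
-- A negative `a` wraps like Python's negative list index (such inputs return normally and
-- are inside Pre_); `a` out of range or `b < 0` raise in Python and are excluded by Pre_.
-- All bitmask values are nonnegative Python ints, modelled as Nat (bitwise ops coincide).
def pvBuildTree (info : List Int) (edges : List (List Int)) : List Nat :=
  edges.foldl (fun tr e =>
    match e with
    | [a, b] =>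
      let i : Int := if a < 0 then a + info.length else a
      tr.set i.toNat (tr.getD i.toNat 0 ||| (1 <<< b.toNat))
    | _ => tr) (List.replicate info.length 0)

-- termination measures for the A port's mutual recursion (cited by name in decreasing_by)
theorem pvLexAG (fuel n : Nat) :
    Prod.Lex (· < ·) (· < ·) (fuel, n + 1 - 1) (fuel + 1, 0) :=
  Prod.Lex.left _ _ (Nat.lt_succ_self fuel)

theorem pvLexGA (fuel n node : Nat) (h : node < n) :
    Prod.Lex (· < ·) (· < ·) (fuel, (0 : Nat)) (fuel, n + 1 - node) :=
  Prod.Lex.right _ (Nat.sub_pos_of_lt (Nat.lt_succ_of_lt h))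

theorem pvSubSuccLt (n node : Nat) (h : node < n) : n + 1 - (node + 1) < n + 1 - node :=
  Nat.sub_succ_lt_self (n + 1) node (Nat.lt_succ_of_lt h)

theorem pvLexGGmin (a fuel n node : Nat) (h : node < n) :
    Prod.Lex (· < ·) (· < ·) (min a fuel, n + 1 - (node + 1)) (fuel, n + 1 - node) := by
  rcases Nat.lt_or_ge (min a fuel) fuel with hlt | hge
  · exact Prod.Lex.left _ _ hlt
  · have hmin : min a fuel = fuel := Nat.le_antisymm (Nat.min_le_right _ _) hge
    rw [hmin]
    exact Prod.Lex.right _ (pvSubSuccLt n node h)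

theorem pvLexGG (fuel n node : Nat) (h : node < n) :
    Prod.Lex (· < ·) (· < ·) (fuel, n + 1 - (node + 1)) (fuel, n + 1 - node) :=
  Prod.Lex.right _ (pvSubSuccLt n node h)

mutual
-- A's inner `dfs`; the mutated memo list is threaded through.  `fuel` is only a totality
-- guard (one unit per call, threaded sequentially and returned); `min r.2 fuel` merely
-- caps the returned fuel at its true value (pvDfsA_fuel_le below shows r.2 ≤ fuel).
def pvDfsA (n : Nat) (info : List Int) (tree : List Nat) (fuel : Nat) (memo : List Int)
    (curr canGo : Nat) (s w : Int) : List Int × Nat :=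
  match fuel with
  | 0 => (memo, 0)
  | fuel' + 1 =>
    if s - w > 0 ∧ memo.getD curr 0 = 0 then
      pvDfsGo n info tree fuel' (memo.set curr s) curr canGo s w 1
    else (memo, fuel')
termination_by (fuel, 0)
decreasing_by
  exact pvLexAG _ _

-- the `while node < len(info)` loop inside A's dfs
def pvDfsGo (n : Nat) (info : List Int) (tree : List Nat) (fuel : Nat) (memo : List Int)
    (curr canGo : Nat) (s w : Int) (node : Nat) : List Int × Nat :=
  if _h : node < n then
    if canGo &&& (1 <<< node) ≠ 0 then
      let r := pvDfsA n info tree fuel memo (curr ||| (1 <<< node))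
                 ((canGo ||| tree.getD node 0) ^^^ (1 <<< node))
                 (s + PySem.Int.bxor (info.getD node 0) 1) (w + info.getD node 0)
      pvDfsGo n info tree (min r.2 fuel) r.1 curr canGo s w (node + 1)
    else pvDfsGo n info tree fuel memo curr canGo s w (node + 1)
  else (memo, fuel)
termination_by (fuel, n + 1 - node)
decreasing_by
  · exact pvLexGA _ _ _ _h
  · exact pvLexGGmin _ _ _ _ _h
  · exact pvLexGG _ _ _ _h
end

def solution (info : List Int) (edges : List (List Int)) : Int :=
  let n := info.length
  let tree := pvBuildTree info edges
  let memo : List Int := List.replicate (1 <<< n) 0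
  let r := pvDfsA n info tree (2 ^ (10 * n + 80)) memo 1 (tree.getD 0 0) 1 0
  (PySem.List.max? r.1 (fun y => y)).getD 0

-- ===== PORT B =====
-- the push loop `for node in range(n-1, 0, -1): ... stack.append(...)`
def pvPush (n : Nat) (info : List Int) (tree : List Nat) (curr canGo : Nat) (s w : Int)
    (st : List (Nat × Nat × Int × Int)) : List (Nat × Nat × Int × Int) :=
  (PySem.List.pyRange ((n : Int) - 1) 0 (-1)).foldl (fun st nd =>
    let node := nd.toNat
    if canGo &&& (1 <<< node) ≠ 0 then
      (curr ||| (1 <<< node), (canGo ||| tree.getD node 0) ^^^ (1 <<< node),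
       s + PySem.Int.bxor (info.getD node 0) 1, w + info.getD node 0) :: st
    else st) st

-- B's worklist loop; `fuel` is only a totality guard (one unit per popped state).
-- `collected.get(curr)` is truthy iff the stored value exists and is nonzero: getD ≠ 0.
def pvLoopB (n : Nat) (info : List Int) (tree : List Nat) (fuel : Nat)
    (collected : PySem.Dict Nat Int) (stack : List (Nat × Nat × Int × Int)) :
    PySem.Dict Nat Int :=
  match fuel, stack with
  | 0, _ => collected
  | _ + 1, [] => collected
  | fuel + 1, (curr, canGo, s, w) :: rest =>
    if s - w ≤ 0 ∨ PySem.Dict.getD collected curr 0 ≠ 0 then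
      pvLoopB n info tree fuel collected rest
    else
      pvLoopB n info tree fuel (PySem.Dict.insert collected curr s)
        (pvPush n info tree curr canGo s w rest)

def solution_alt (info : List Int) (edges : List (List Int)) : Int :=
  let n := info.length
  let tree := pvBuildTree info edges
  let d := pvLoopB n info tree (2 ^ (10 * n + 80)) PySem.Dict.empty [(1, tree.getD 0 0, 1, 0)]
  (PySem.List.max? (PySem.Dict.values d) (fun y => y)).getD 0

-- ===== PRECONDITION & SPEC =====
-- Pre_ excludes exactly the inputs where A raises: empty info (IndexError at tree[0]),
-- an edge that is not a pair (ValueError), edge[0] outside Python list-index range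
-- (IndexError), or edge[1] < 0 (ValueError at 1 << b).
def Pre_solution (info : List Int) (edges : List (List Int)) : Prop :=
  info ≠ [] ∧ ∀ e ∈ edges, e.length = 2 ∧ -(info.length : Int) ≤ e.getD 0 0 ∧
    e.getD 0 0 < (info.length : Int) ∧ 0 ≤ e.getD 1 0
instance (info : List Int) (edges : List (List Int)) : Decidable (Pre_solution info edges) := by
  unfold Pre_solution; infer_instance

def pvWitness_solution : List Int × List (List Int) := ([0, 0, 1, 1], [[0, 1], [1, 2], [0, 3]])

def Spec_solution (info : List Int) (edges : List (List Int)) (out : Int) : Prop := out = solution_alt info edges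
instance (info : List Int) (edges : List (List Int)) (out : Int) : Decidable (Spec_solution info edges out) := by unfold Spec_solution; infer_instance

-- ===== CLAIM (what is proved, stated in full; the proofs are below) =====
def Claim_equal_solution : Prop := ∀ (info : List Int) (edges : List (List Int)), Dom_solution info edges → Pre_solution info edges → Spec_solution info edges (solution info edges)

-- ===== LEMMAS AND PROOFS =====

-- the ascending child-state list of a passing state, from `node` upwards (proof device)
def pvKids (n : Nat) (info : List Int) (tree : List Nat) (curr canGo : Nat) (s w : Int)
    (node : Nat) : List (Nat × Nat × Int × Int) :=
  if _h : node < n then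
    (if canGo &&& (1 <<< node) ≠ 0 then
      [(curr ||| (1 <<< node), (canGo ||| tree.getD node 0) ^^^ (1 <<< node),
        s + PySem.Int.bxor (info.getD node 0) 1, w + info.getD node 0)]
     else []) ++ pvKids n info tree curr canGo s w (node + 1)
  else []
termination_by n - node
decreasing_by omega

-- one candidate child as an Option (proof device)
def pvPick (_n : Nat) (info : List Int) (tree : List Nat) (curr canGo : Nat) (s w : Int)
    (node : Nat) : Option (Nat × Nat × Int × Int) :=
  if canGo &&& (1 <<< node) ≠ 0 then
    some (curr ||| (1 <<< node), (canGo ||| tree.getD node 0) ^^^ (1 <<< node),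
      s + PySem.Int.bxor (info.getD node 0) 1, w + info.getD node 0)
  else none

-- the coupling invariant between A's memo array and B's `collected` dict:
-- same lookup everywhere, slot 0 untouched, the root slot already recorded as 1,
-- and every recorded value is realised somewhere in the array
def pvMemR (n : Nat) (memo : List Int) (d : PySem.Dict Nat Int) : Prop :=
  memo.length = 2 ^ n ∧ memo.getD 0 0 = 0 ∧ memo.getD 1 0 = 1 ∧
  (∀ c : Nat, PySem.Dict.getD d c 0 = memo.getD c 0) ∧
  (∀ v ∈ PySem.Dict.values d, ∃ i, i < memo.length ∧ memo.getD i 0 = v)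

theorem pvLoopB_nil (n : Nat) (info : List Int) (tree : List Nat) (fuel : Nat)
    (d : PySem.Dict Nat Int) : pvLoopB n info tree fuel d [] = d := by
  cases fuel <;> rfl

theorem pvGetDSetSelf (l : List Int) (i : Nat) (v : Int) (h : i < l.length) :
    (l.set i v).getD i 0 = v := by
  simp [List.getD_eq_getElem?_getD, h]

theorem pvGetDSetNe (l : List Int) (i j : Nat) (v : Int) (h : i ≠ j) :
    (l.set i v).getD j 0 = l.getD j 0 := by
  simp [List.getD_eq_getElem?_getD, h]

theorem pvMemR_record (n : Nat) (memo : List Int) (d : PySem.Dict Nat Int)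
    (curr : Nat) (s : Int) (hR : pvMemR n memo d) (hlt : curr < 2 ^ n)
    (hpos : 1 ≤ curr) (h0 : memo.getD curr 0 = 0) :
    pvMemR n (memo.set curr s) (PySem.Dict.insert d curr s) := by
  obtain ⟨hlen, hz, h1, hget, hvals⟩ := hR
  have hlt' : curr < memo.length := by rw [hlen]; exact hlt
  have hc1 : curr ≠ 1 := by
    intro h; rw [h] at h0; rw [h0] at h1; exact absurd h1 (by norm_num)
  refine ⟨by simpa using hlen, ?_, ?_, ?_, ?_⟩
  · rw [pvGetDSetNe memo curr 0 s (by omega)]; exact hz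
  · rw [pvGetDSetNe memo curr 1 s hc1]; exact h1
  · intro c
    rw [PySem.Dict.getD_insert]
    by_cases hc : c = curr
    · subst hc; rw [if_pos rfl, pvGetDSetSelf memo c s hlt']
    · rw [if_neg hc, pvGetDSetNe memo curr c s (fun h => hc h.symm)]; exact hget c
  · intro v hv
    rcases PySem.Dict.mem_values_insert _ _ _ _ hv with hvs | hvd
    · exact ⟨curr, by simpa using hlt', by rw [hvs]; exact pvGetDSetSelf memo curr s hlt'⟩
    · obtain ⟨i, hi, hiv⟩ := hvals v hvd
      by_cases hic : i = curr
      · refine ⟨0, ?_, ?_⟩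
        · rw [List.length_set, hlen]; exact Nat.two_pow_pos n
        · rw [pvGetDSetNe memo curr 0 s (by omega), hz, ← hiv, hic, h0]
      · exact ⟨i, by simpa using hi, by rw [pvGetDSetNe memo curr i s (fun h => hic h.symm)]; exact hiv⟩

-- fuel returned by the A port never exceeds the fuel given (so `min r.2 fuel = r.2`)
theorem pvDfsGo_fuel_le_aux (n : Nat) (info : List Int) (tree : List Nat) :
    ∀ (k node fuel : Nat), n - node ≤ k → ∀ memo curr canGo s w,
      (pvDfsGo n info tree fuel memo curr canGo s w node).2 ≤ fuel := by
  intro k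
  induction k with
  | zero =>
    intro node fuel hk memo curr canGo s w
    rw [pvDfsGo]
    rw [dif_neg (by omega)]
  | succ k ih =>
    intro node fuel hk memo curr canGo s w
    by_cases hn : node < n
    · rw [pvDfsGo, dif_pos hn]
      by_cases hbit : canGo &&& (1 <<< node) ≠ 0
      · rw [if_pos hbit]
        exact le_trans (ih (node + 1) _ (by omega) _ _ _ _ _) (Nat.min_le_right _ _)
      · rw [if_neg hbit]
        exact ih (node + 1) fuel (by omega) memo curr canGo s w
    · rw [pvDfsGo, dif_neg hn]

theorem pvDfsA_fuel_le (n : Nat) (info : List Int) (tree : List Nat) : ∀ (fuel : Nat)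
    (memo : List Int) (curr canGo : Nat) (s w : Int),
    (pvDfsA n info tree fuel memo curr canGo s w).2 ≤ fuel := by
  intro fuel memo curr canGo s w
  cases fuel with
    | zero => rw [pvDfsA]
    | succ f =>
      rw [pvDfsA]
      split
      · exact le_trans (pvDfsGo_fuel_le_aux n info tree n 1 f (by omega)
          _ _ _ _ _) (Nat.le_succ f)
      · exact Nat.le_succ f

-- B's reversed-range push builds exactly the ascending child list on top of the stack
theorem pvFoldrPush (n : Nat) (info : List Int) (tree : List Nat) (curr canGo : Nat)
    (s w : Int) (l : List Int) (st : List (Nat × Nat × Int × Int)) :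
    l.foldr (fun nd acc =>
        (fun st (nd : Int) =>
          let node := nd.toNat
          if canGo &&& (1 <<< node) ≠ 0 then
            (curr ||| (1 <<< node), (canGo ||| tree.getD node 0) ^^^ (1 <<< node),
             s + PySem.Int.bxor (info.getD node 0) 1, w + info.getD node 0) :: st
          else st) acc nd) st
      = l.filterMap (fun nd => pvPick n info tree curr canGo s w nd.toNat) ++ st := by
  induction l with
  | nil => rfl
  | cons h t ih =>
    simp only [List.foldr_cons, List.filterMap_cons, ih, pvPick]
    by_cases hb : canGo &&& (1 <<< h.toNat) ≠ 0
    · simp [hb]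
    · simp [hb]

theorem pvKids_eq (n : Nat) (info : List Int) (tree : List Nat) (curr canGo : Nat)
    (s w : Int) : ∀ (j node : Nat), j = n - node →
    (List.range j).filterMap (fun k => pvPick n info tree curr canGo s w (node + k))
      = pvKids n info tree curr canGo s w node := by
  intro j
  induction j with
  | zero =>
    intro node hj
    rw [pvKids, dif_neg (by omega)]
    rfl
  | succ j ih =>
    intro node hj
    have hn : node < n := by omega
    rw [pvKids, dif_pos hn]
    rw [List.range_succ_eq_map, List.filterMap_cons, List.filterMap_map]
    have hcomp : ((fun k => pvPick n info tree curr canGo s w (node + k)) ∘ Nat.succ)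
        = fun k => pvPick n info tree curr canGo s w ((node + 1) + k) := by
      funext k
      simp only [Function.comp]
      congr 1
      omega
    rw [hcomp, ih (node + 1) (by omega)]
    simp only [Nat.add_zero, pvPick]
    by_cases hb : canGo &&& (1 <<< node) ≠ 0
    · simp [hb]
    · simp [hb]

theorem pvPush_eq_kids (n : Nat) (info : List Int) (tree : List Nat) (curr canGo : Nat)
    (s w : Int) (st : List (Nat × Nat × Int × Int)) :
    pvPush n info tree curr canGo s w st
      = pvKids n info tree curr canGo s w 1 ++ st := by
  unfold pvPush
  rw [PySem.List.pyRange_neg_one_eq_reverse]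
  rw [List.foldl_reverse]
  rw [show ((0 : Int) + 1) = (1 : Int) by ring, show ((n : Int) - 1 + 1) = (n : Int) by ring]
  rw [pvFoldrPush]
  congr 1
  rw [PySem.List.pyRange_one]
  rw [List.filterMap_map]
  have h1 : ((n : Int) - 1).toNat = n - 1 := by omega
  rw [h1]
  have hcomp : ((fun nd => pvPick n info tree curr canGo s w (Int.toNat nd)) ∘ fun k : Nat => (1 : Int) + k)
      = fun k : Nat => pvPick n info tree curr canGo s w (1 + k) := by
    funext k
    have hk : ((1 : Int) + (k : Int)).toNat = 1 + k := by omega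
    simp only [Function.comp, hk]
  rw [hcomp]
  exact pvKids_eq n info tree curr canGo s w (n - 1) 1 (by omega)

-- statement of the simulation at a given fuel (proof device)
def pvSimAStmt (n : Nat) (info : List Int) (tree : List Nat) (fuel : Nat) : Prop :=
  ∀ (memo : List Int) (curr canGo : Nat) (s w : Int) (d : PySem.Dict Nat Int)
    (rest : List (Nat × Nat × Int × Int)),
    pvMemR n memo d → curr < 2 ^ n → 1 ≤ curr →
    ∃ d', pvLoopB n info tree fuel d ((curr, canGo, s, w) :: rest)
        = pvLoopB n info tree (pvDfsA n info tree fuel memo curr canGo s w).2 d' rest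
      ∧ pvMemR n (pvDfsA n info tree fuel memo curr canGo s w).1 d'

theorem pvSimGo_aux (n : Nat) (info : List Int) (tree : List Nat) (F : Nat)
    (hA : ∀ g, g ≤ F → pvSimAStmt n info tree g) :
    ∀ (k node fuel : Nat), n - node ≤ k → fuel ≤ F →
    ∀ (memo : List Int) (curr canGo : Nat) (s w : Int) (d : PySem.Dict Nat Int)
      (rest : List (Nat × Nat × Int × Int)),
      pvMemR n memo d → curr < 2 ^ n → 1 ≤ curr →
      ∃ d', pvLoopB n info tree fuel d
            (pvKids n info tree curr canGo s w node ++ rest)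
          = pvLoopB n info tree (pvDfsGo n info tree fuel memo curr canGo s w node).2 d' rest
        ∧ pvMemR n (pvDfsGo n info tree fuel memo curr canGo s w node).1 d' := by
  intro k
  induction k with
  | zero =>
    intro node fuel hk hF memo curr canGo s w d rest hR hlt hpos
    rw [pvKids, dif_neg (by omega), pvDfsGo, dif_neg (by omega)]
    exact ⟨d, rfl, hR⟩
  | succ k ih =>
    intro node fuel hk hF memo curr canGo s w d rest hR hlt hpos
    by_cases hn : node < n
    · rw [pvKids, dif_pos hn, pvDfsGo, dif_pos hn]
      by_cases hbit : canGo &&& (1 <<< node) ≠ 0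
      · rw [if_pos hbit]
        simp only [if_pos hbit, List.cons_append, List.nil_append]
        -- child invariants
        have hshift : (1 <<< node : Nat) < 2 ^ n := by
          rw [Nat.shiftLeft_eq, one_mul]
          exact Nat.pow_lt_pow_right (by omega) hn
        have hlt' : curr ||| (1 <<< node) < 2 ^ n := Nat.or_lt_two_pow hlt hshift
        have hpos' : 1 ≤ curr ||| (1 <<< node) := le_trans hpos Nat.left_le_or
        obtain ⟨d1, heq1, hR1⟩ := hA fuel hF memo _ _ _ _ d
          (pvKids n info tree curr canGo s w (node + 1) ++ rest) hR hlt' hpos'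
        have hfle : (pvDfsA n info tree fuel memo (curr ||| (1 <<< node))
            ((canGo ||| tree.getD node 0) ^^^ (1 <<< node))
            (s + PySem.Int.bxor (info.getD node 0) 1) (w + info.getD node 0)).2 ≤ fuel :=
          pvDfsA_fuel_le n info tree fuel memo _ _ _ _
        obtain ⟨d', heq2, hR2⟩ := ih (node + 1) _ (by omega)
          (le_trans (Nat.min_le_right _ _) hF) _ curr canGo s w d1 rest hR1 hlt hpos
        refine ⟨d', ?_, hR2⟩
        rw [heq1]
        rw [Nat.min_eq_left hfle] at heq2 ⊢
        exact heq2
      · rw [if_neg hbit]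
        simp only [if_neg hbit, List.nil_append]
        exact ih (node + 1) fuel (by omega) hF memo curr canGo s w d rest hR hlt hpos
    · rw [pvKids, dif_neg hn, pvDfsGo, dif_neg hn]
      exact ⟨d, rfl, hR⟩

theorem pvSimA (n : Nat) (info : List Int) (tree : List Nat) : ∀ (fuel : Nat),
    pvSimAStmt n info tree fuel := by
  intro fuel
  induction fuel using Nat.strong_induction_on with
  | _ fuel IH =>
    intro memo curr canGo s w d rest hR hlt hpos
    cases fuel with
    | zero =>
      rw [pvDfsA]
      exact ⟨d, by cases rest <;> rfl, hR⟩
    | succ f =>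
      rw [pvDfsA]
      have hget := hR.2.2.2.1
      by_cases hc : s - w > 0 ∧ memo.getD curr 0 = 0
      · rw [if_pos hc]
        show ∃ d', pvLoopB n info tree (f + 1) d ((curr, canGo, s, w) :: rest) = _ ∧ _
        rw [pvLoopB]
        rw [if_neg (by rw [hget curr]; omega)]
        rw [pvPush_eq_kids]
        have hR' := pvMemR_record n memo d curr s hR hlt hpos hc.2
        exact pvSimGo_aux n info tree f (fun g hg => IH g (Nat.lt_succ_of_le hg)) n 1 f
          (by omega) (le_refl f) (memo.set curr s) curr canGo s w _ rest hR' hlt hpos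
      · rw [if_neg hc]
        show ∃ d', pvLoopB n info tree (f + 1) d ((curr, canGo, s, w) :: rest) = _ ∧ _
        rw [pvLoopB]
        rw [if_pos (by rw [hget curr]; omega)]
        exact ⟨d, rfl, hR⟩

theorem pvReplicateGetD (k c : Nat) : (List.replicate k (0 : Int)).getD c 0 = 0 := by
  simp only [List.getD_eq_getElem?_getD, List.getElem?_replicate]
  split <;> rfl

-- from the invariant, max over A's array equals max over B's recorded values
theorem pvFinalMax (n : Nat) (memo : List Int) (d : PySem.Dict Nat Int)
    (hR : pvMemR n memo d) :
    (PySem.List.max? memo (fun y => y)).getD 0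
      = (PySem.List.max? (PySem.Dict.values d) (fun y => y)).getD 0 := by
  obtain ⟨hlen, hz, h1, hget, hvals⟩ := hR
  have hne : memo ≠ [] := by
    intro h; rw [h] at hlen; have := Nat.one_le_two_pow (n := n); simp at hlen; omega
  -- 1 is a recorded value of d
  have hd1 : PySem.Dict.getD d 1 0 = 1 := by rw [hget 1]; exact h1
  have hone : (1 : Int) ∈ PySem.Dict.values d := by
    have hsome : PySem.Dict.get? d 1 = some 1 := by
      rw [PySem.Dict.getD_eq_get?_getD] at hd1
      cases hg : PySem.Dict.get? d 1 with
      | none => rw [hg] at hd1; simp at hd1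
      | some v => rw [hg] at hd1; simp at hd1; rw [hd1]
    have hitem := PySem.Dict.mem_items_of_get?_eq_some _ hsome
    simp only [PySem.Dict.values]
    exact List.mem_map.mpr ⟨(1, 1), hitem, rfl⟩
  have hvne : PySem.Dict.values d ≠ [] := fun h => by rw [h] at hone; exact absurd hone (List.not_mem_nil)
  cases hma : PySem.List.max? memo (fun y => y) with
  | none => exact absurd ((PySem.List.max?_eq_none_iff _ _).mp hma) hne
  | some a =>
    cases hmb : PySem.List.max? (PySem.Dict.values d) (fun y => y) with
    | none => exact absurd ((PySem.List.max?_eq_none_iff _ _).mp hmb) hvne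
    | some b =>
      simp only [Option.getD_some]
      have hamem := PySem.List.max?_mem hma
      have hamax := PySem.List.max?_isMax hma
      have hbmem := PySem.List.max?_mem hmb
      have hbmax := PySem.List.max?_isMax hmb
      -- b ≤ a : every recorded value occurs in the array
      have hba : b ≤ a := by
        obtain ⟨i, hi, hiv⟩ := hvals b hbmem
        have : memo.getD i 0 ∈ memo := by
          rw [List.getD_eq_getElem?_getD, List.getElem?_eq_getElem hi]
          exact List.getElem_mem hi
        rw [hiv] at this
        exact hamax b this
      -- a ≤ b : a nonzero array maximum is a recorded value; a zero one is below 1 ∈ values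
      have hab : a ≤ b := by
        by_cases ha0 : a = 0
        · rw [ha0]
          exact le_trans (by norm_num) (hbmax 1 hone)
        · obtain ⟨i, hi, hiv⟩ := List.mem_iff_getElem.mp hamem
          have hgi : memo.getD i 0 = a := by
            rw [List.getD_eq_getElem?_getD, List.getElem?_eq_getElem hi, hiv]; rfl
          have hdi : PySem.Dict.getD d i 0 = a := by rw [hget i]; exact hgi
          have hsome : PySem.Dict.get? d i = some a := by
            rw [PySem.Dict.getD_eq_get?_getD] at hdi
            cases hg : PySem.Dict.get? d i with
            | none => rw [hg] at hdi; simp at hdi; exact absurd hdi.symm ha0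
            | some v => rw [hg] at hdi; simp at hdi; rw [hdi]
          have hitem := PySem.Dict.mem_items_of_get?_eq_some _ hsome
          have : a ∈ PySem.Dict.values d := by
            simp only [PySem.Dict.values]
            exact List.mem_map.mpr ⟨(i, a), hitem, rfl⟩
          exact hbmax a this
      exact le_antisymm hab hba

-- ===== VERDICT (by name: the statement is the Claim_ definition above) =====
theorem solution_spec : Claim_equal_solution := by
  unfold Claim_equal_solution
  intro info edges _ hpre
  unfold Spec_solution
  simp only [solution, solution_alt]
  obtain ⟨hne, _⟩ := hpre
  set n := info.length with hn
  set tree := pvBuildTree info edges with htree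
  have hn1 : 1 ≤ n := by
    cases info with
    | nil => exact absurd rfl hne
    | cons h t => simp [hn]
  have hpow : (1 <<< n : Nat) = 2 ^ n := by rw [Nat.shiftLeft_eq, one_mul]
  have h1lt : 1 < 2 ^ n := by rw [Nat.one_lt_two_pow_iff]; omega
  -- unroll the first A call and the first B pop: both record the root state (1, ·, 1, 0)
  have hfs : 2 ^ (10 * n + 80) = (2 ^ (10 * n + 80) - 1) + 1 := by
    have := Nat.one_le_two_pow (n := 10 * n + 80); omega
  set F := 2 ^ (10 * n + 80) - 1 with hF
  set memo0 : List Int := List.replicate (1 <<< n) 0 with hmemo0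
  have hA1 : pvDfsA n info tree (2 ^ (10 * n + 80)) memo0 1 (tree.getD 0 0) 1 0
      = pvDfsGo n info tree F (memo0.set 1 1) 1 (tree.getD 0 0) 1 0 1 := by
    rw [hfs, pvDfsA, if_pos ⟨by norm_num, pvReplicateGetD _ 1⟩]
  have hB1 : pvLoopB n info tree (2 ^ (10 * n + 80)) PySem.Dict.empty [(1, tree.getD 0 0, 1, 0)]
      = pvLoopB n info tree F (PySem.Dict.insert PySem.Dict.empty 1 1)
          (pvPush n info tree 1 (tree.getD 0 0) 1 0 []) := by
    rw [hfs, pvLoopB, if_neg (by rw [PySem.Dict.getD_empty]; norm_num)]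
  -- invariant after the root record
  have hR1 : pvMemR n (memo0.set 1 1) (PySem.Dict.insert PySem.Dict.empty 1 1) := by
    have hlen0 : memo0.length = 2 ^ n := by rw [hmemo0]; simp [hpow]
    have hlt1 : 1 < memo0.length := by rw [hlen0]; exact h1lt
    refine ⟨by simpa using hlen0, ?_, ?_, ?_, ?_⟩
    · rw [pvGetDSetNe memo0 1 0 1 (by omega), hmemo0]; exact pvReplicateGetD _ 0
    · exact pvGetDSetSelf memo0 1 1 hlt1
    · intro c
      rw [PySem.Dict.getD_insert, PySem.Dict.getD_empty]
      by_cases hc : c = 1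
      · subst hc; rw [if_pos rfl, pvGetDSetSelf memo0 1 1 hlt1]
      · rw [if_neg hc, pvGetDSetNe memo0 1 c 1 (fun h => hc h.symm), hmemo0,
          pvReplicateGetD]
    · intro v hv
      rcases PySem.Dict.mem_values_insert _ _ _ _ hv with hvs | hvd
      · exact ⟨1, by simpa using hlt1, by rw [hvs]; exact pvGetDSetSelf memo0 1 1 hlt1⟩
      · rw [show PySem.Dict.values (PySem.Dict.empty : PySem.Dict Nat Int) = [] from rfl] at hvd
        exact absurd hvd (List.not_mem_nil)
  rw [hA1, hB1, pvPush_eq_kids]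
  obtain ⟨d', heq, hR'⟩ := pvSimGo_aux n info tree F
    (fun g _ => pvSimA n info tree g) n 1 F (by omega) (le_refl F)
    (memo0.set 1 1) 1 (tree.getD 0 0) 1 0 (PySem.Dict.insert PySem.Dict.empty 1 1) []
    hR1 h1lt (le_refl 1)
  rw [heq, pvLoopB_nil]
  exact pvFinalMax n _ d' hR'
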